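-- pv_equiv track=rewrite | github.com/miliar/Code_Jam_Webscraper | Solutions_python/Problem_199/3876.py | childs
-- ===== SOURCE A (Python) =====
-- def childs(s, k):
-- 	c = []
-- 	for i in range(0, len(s)-k+1):
-- 		sn = s
-- 		for x in range(0, k):
-- 			sn = flip(sn, i + x)
-- 		c.append(sn)
-- 	return c
--
-- def flip(s, i):
-- 	c = s[i]
-- 	if c is "-":
-- 		c = "+"
-- 	else:
-- 		c = "-"
-- 	return s[:i] + c + s[i+1:]
-- ===== SOURCE B (Python) =====
-- def childs(s, k):
--     flipped = ''.join('+' if ch == '-' else '-' for ch in s)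
--     return [''.join(f if i <= j < i + k else c
--                     for j, (c, f) in enumerate(zip(s, flipped)))
--             for i in range(len(s) - k + 1)]
-- ===== Notes on version B (the rewrite author's own statement) =====
-- stated objective: simpler
-- what changed: B precomputes the fully flipped string once and assembles each window's child by per-index selection between the original and the flipped table, instead of A's per-window loop of k successive flip calls that each rebuild the whole string by slicing.
import Mathlib
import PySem

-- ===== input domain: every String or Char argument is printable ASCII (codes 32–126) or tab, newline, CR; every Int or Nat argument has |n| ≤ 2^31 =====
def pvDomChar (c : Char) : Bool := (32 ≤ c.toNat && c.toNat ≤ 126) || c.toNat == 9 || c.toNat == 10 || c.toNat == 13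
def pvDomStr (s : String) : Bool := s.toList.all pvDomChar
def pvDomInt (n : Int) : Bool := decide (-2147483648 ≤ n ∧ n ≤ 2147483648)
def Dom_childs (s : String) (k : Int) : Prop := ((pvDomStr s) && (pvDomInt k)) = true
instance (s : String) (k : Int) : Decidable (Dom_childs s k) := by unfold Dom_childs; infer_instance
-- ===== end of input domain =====

-- B precomputes the fully flipped string once and assembles each child by per-index
-- selection between the original and the flipped table, instead of A's per-window loop
-- of k successive flip calls each rebuilding the whole string by slicing (objective: simpler).

-- ===== PORT A =====
-- helper 'flip' of A, on the char list of the string; `c is "-"` on a one-char string is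
-- equality in CPython (single-char interning), ported as `=`. The `none` branch is Python's
-- IndexError; childs only calls flip with in-range indices, so it is unreachable there.
def flipA (sn : List Char) (i : Int) : List Char :=
  match PySem.List.pyGet? sn i with
  | some c0 =>
      let c : Char := if c0 = '-' then '+' else '-'
      PySem.List.slice sn none (some i) ++ [c] ++ PySem.List.slice sn (some (i + 1)) none
  | none => sn

def childs (s : String) (k : Int) : List String :=
  (PySem.List.pyRange 0 (PySem.Str.len s - k + 1) 1).foldl
    (fun c i =>
      let sn := (PySem.List.pyRange 0 k 1).foldl (fun sn x => flipA sn (i + x)) s.toList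
      c ++ [String.ofList sn]) []

-- ===== PORT B =====
-- the per-character flip of Source B's comprehensions
def flipc (ch : Char) : Char := if ch = '-' then '+' else '-'

def childs_alt (s : String) (k : Int) : List String :=
  let cs := s.toList
  let flipped := cs.map flipc
  (PySem.List.pyRange 0 (PySem.Str.len s - k + 1) 1).map (fun i =>
    String.ofList ((PySem.List.enumerate (cs.zip flipped)).map
      (fun jcf => if i ≤ jcf.1 ∧ jcf.1 < i + k then jcf.2.2 else jcf.2.1)))

-- ===== PRECONDITION & SPEC =====
def Spec_childs (s : String) (k : Int) (out : List String) : Prop := out = childs_alt s k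
instance (s : String) (k : Int) (out : List String) : Decidable (Spec_childs s k out) := by unfold Spec_childs; infer_instance

-- ===== CLAIM (what is proved, stated in full; the proofs are below) =====
def Claim_equal_childs : Prop := ∀ (s : String) (k : Int), Dom_childs s k → Spec_childs s k (childs s k)

-- ===== LEMMAS AND PROOFS =====

-- A's flip at the position right after prefix u flips exactly that character.
lemma flipA_append (u v : List Char) (c : Char) :
    flipA (u ++ c :: v) ((u.length : Nat) : Int) = u ++ (if c = '-' then '+' else '-') :: v := by
  unfold flipA
  have hg : PySem.List.pyGet? (u ++ c :: v) ((u.length : Nat) : Int) = some c := by simp [pysem]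
  have h1 : PySem.List.slice (u ++ c :: v) none (some ((u.length : Nat) : Int)) = u := by
    simp [PySem.List.slice_to_natCast]
  have h2 : PySem.List.slice (u ++ c :: v) (some (((u.length : Nat) : Int) + 1)) none = v := by
    rw [show ((u.length : Nat) : Int) + 1 = ((u.length + 1 : Nat) : Int) by push_cast; ring,
       PySem.List.slice_from_natCast]
    simp
  rw [hg, h1, h2]
  simp

-- A's inner loop flips the m characters starting at position ni.
lemma innerLoop (cs : List Char) (ni m : Nat) (h : ni + m ≤ cs.length) :
    (PySem.List.pyRange 0 (m : Int) 1).foldl (fun sn x => flipA sn ((ni : Int) + x)) cs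
      = cs.take ni ++ ((cs.drop ni).take m).map flipc ++ cs.drop (ni + m) := by
  induction m with
  | zero =>
      simp [PySem.List.pyRange_one_eq_nil]
  | succ m ih =>
      have hm : ni + m ≤ cs.length := by omega
      rw [show ((m + 1 : Nat) : Int) = (m : Int) + 1 by push_cast; ring,
         PySem.List.pyRange_one_succ_right (by positivity), List.foldl_append, ih hm]
      have hlt : ni + m < cs.length := by omega
      have hdrop : cs.drop (ni + m) = cs[ni + m] :: cs.drop (ni + m + 1) :=
        List.drop_eq_getElem_cons hlt
      have hlen : (cs.take ni ++ ((cs.drop ni).take m).map flipc).length = ni + m := by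
        simp [List.length_take, List.length_drop]; omega
      rw [hdrop, List.foldl_cons, List.foldl_nil, show cs.take ni ++ ((cs.drop ni).take m).map flipc ++ cs[ni+m] :: cs.drop (ni+m+1)
            = (cs.take ni ++ ((cs.drop ni).take m).map flipc) ++ cs[ni+m] :: cs.drop (ni+m+1) by simp,
         show ((ni : Int) + (m : Int)) = (((cs.take ni ++ ((cs.drop ni).take m).map flipc).length : Nat) : Int) by rw [hlen]; push_cast; ring,
         flipA_append]
      have htake : (cs.drop ni).take (m+1) = (cs.drop ni).take m ++ [cs[ni+m]] := by
        rw [← List.take_concat_get' _ _ (by simp [List.length_drop]; omega)]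
        congr 1
        rw [List.getElem_drop]
      rw [htake]
      simp [flipc]
      omega

-- B's per-index selection with an empty interval returns the original characters.
lemma Bempty (cs : List Char) (s a b : Int) (hba : b ≤ a) :
    (PySem.List.enumerate (cs.zip (cs.map flipc)) s).map
      (fun jcf => if a ≤ jcf.1 ∧ jcf.1 < b then jcf.2.2 else jcf.2.1) = cs := by
  have : ∀ jcf ∈ PySem.List.enumerate (cs.zip (cs.map flipc)) s,
      (if a ≤ jcf.1 ∧ jcf.1 < b then jcf.2.2 else jcf.2.1) = jcf.2.1 := by
    intro jcf _
    rw [if_neg (by omega)]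
  rw [List.map_congr_left this,
     show (fun (a : Int × Char × Char) => a.2.1) = (fun (p : Char × Char) => p.1) ∘ (fun (a : Int × Char × Char) => a.2) from rfl,
     ← List.map_map, PySem.List.map_snd_enumerate]
  exact List.map_fst_zip (by simp)

-- B's per-index selection over [s+ni, s+ni+m) is take ++ flipped segment ++ drop.
lemma Bform (cs : List Char) (s : Int) (ni m : Nat) (h : ni + m ≤ cs.length) :
    (PySem.List.enumerate (cs.zip (cs.map flipc)) s).map
      (fun jcf => if s + (ni : Int) ≤ jcf.1 ∧ jcf.1 < s + (ni : Int) + (m : Int) then jcf.2.2 else jcf.2.1)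
      = cs.take ni ++ ((cs.drop ni).take m).map flipc ++ cs.drop (ni + m) := by
  induction cs generalizing s ni m with
  | nil =>
      have : ni = 0 ∧ m = 0 := by simp at h; omega
      simp [PySem.List.enumerate_nil, this.1, this.2]
  | cons c cs ih =>
      cases ni with
      | succ ni =>
          simp only [List.map_cons, List.zip_cons_cons, PySem.List.enumerate_cons, List.map]
          rw [if_neg (by push_cast; omega)]
          simp only [List.take_succ_cons, List.drop_succ_cons, List.cons_append]
          congr 1
          rw [show (ni + 1 + m : Nat) = (ni + m) + 1 by omega, List.drop_succ_cons]
          have := ih (s+1) ni m (by simp only [List.length_cons] at h; omega)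
          rw [← this]
          apply List.map_congr_left
          intro jcf _
          exact if_congr (by push_cast; omega) rfl rfl
      | zero =>
          cases m with
          | zero => exact Bempty _ s _ _ (by omega)
          | succ m =>
              simp only [List.map_cons, List.zip_cons_cons, PySem.List.enumerate_cons, List.map]
              rw [if_pos (by push_cast; omega)]
              simp only [List.take_zero, List.drop_zero, List.take_succ_cons, List.map_cons,
                List.nil_append, List.cons_append, Nat.zero_add, List.drop_succ_cons]
              congr 1
              have := ih (s+1) 0 m (by simp only [List.length_cons] at h; omega)
              simp only [List.take_zero, List.drop_zero, List.nil_append, Nat.zero_add] at this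
              rw [← this]
              apply List.map_congr_left
              intro jcf hmem
              have hge : s + 1 ≤ jcf.1 := by
                have h1 : jcf.1 ∈ (PySem.List.enumerate (cs.zip (cs.map flipc)) (s+1)).map (·.1) :=
                  List.mem_map_of_mem hmem
                rw [PySem.List.map_fst_enumerate] at h1
                exact (PySem.List.mem_pyRange_one.mp h1).1
              exact if_congr (by push_cast; omega) rfl rfl

-- ===== VERDICT (by name: the statement is the Claim_ definition above) =====
theorem childs_spec : Claim_equal_childs := by
  intro s k _
  unfold Spec_childs childs childs_alt
  rw [PySem.List.foldl_append_singleton_eq_map]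
  simp only [List.nil_append]
  apply List.map_congr_left
  intro i hi
  rw [PySem.List.mem_pyRange_one] at hi
  congr 1
  by_cases hk : k ≤ 0
  · rw [PySem.List.pyRange_one_eq_nil hk, List.foldl_nil, Bempty s.toList 0 i (i + k) (by omega)]
  · have hn : PySem.Str.len s = (s.toList.length : Int) := by simp [pysem]
    have hbound : i.toNat + k.toNat ≤ s.toList.length := by
      rw [hn] at hi; omega
    have hB := Bform s.toList 0 i.toNat k.toNat hbound
    simp only [zero_add] at hB
    rw [show i = ((i.toNat : Nat) : Int) by omega, show k = ((k.toNat : Nat) : Int) by omega,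
       innerLoop s.toList i.toNat k.toNat hbound, hB]
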